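-- pv_equiv track=rewrite | github.com/ttheew/symphony | src/symphony/conductor/node_registry.py | _merge_mounts
-- ===== SOURCE A (Python) =====
-- from typing import Any, Dict, List, Mapping, Optional
--
-- def _merge_mounts(
--     static_mounts: List[Dict[str, Any]], dyn_mounts: List[Dict[str, Any]]
-- ) -> List[Dict[str, Any]]:
--     s_by_mp = {
--         m.get("mount_point"): dict(m) for m in static_mounts if m.get("mount_point")
--     }
--     d_by_mp = {
--         m.get("mount_point"): dict(m) for m in dyn_mounts if m.get("mount_point")
--     }
--
--     merged: List[Dict[str, Any]] = []
--     all_mps = sorted(set(s_by_mp.keys()) | set(d_by_mp.keys()))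
--     for mp in all_mps:
--         s = s_by_mp.get(mp, {})
--         d = d_by_mp.get(mp, {})
--         merged.append({"mount_point": mp, **s, **d})
--     return merged
-- ===== SOURCE B (Python) =====
-- from typing import Any, Dict, List
--
--
-- def _merge_mounts(
--     static_mounts: List[Dict[str, Any]], dyn_mounts: List[Dict[str, Any]]
-- ) -> List[Dict[str, Any]]:
--     # No index dicts and no library sort: filter once, then repeatedly select the
--     # smallest remaining mount_point, scan each list for its last matching entry
--     # (last one wins, dynamic fields override static), emit, and drop that key.
--     stat = [m for m in static_mounts if m.get("mount_point")]
--     dyn = [m for m in dyn_mounts if m.get("mount_point")]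
--     out = []
--     while stat or dyn:
--         mp = min(m["mount_point"] for m in stat + dyn)
--         s = {}
--         for m in stat:
--             if m["mount_point"] == mp:
--                 s = m
--         d = {}
--         for m in dyn:
--             if m["mount_point"] == mp:
--                 d = m
--         out.append({"mount_point": mp, **s, **d})
--         stat = [m for m in stat if m["mount_point"] != mp]
--         dyn = [m for m in dyn if m["mount_point"] != mp]
--     return out
-- ===== Notes on version B (the rewrite author's own statement) =====
-- stated objective: alternative
-- what changed: B builds no index dicts and calls no sort: it filters the two lists once, then repeatedly selects the smallest remaining mount_point, scans each list for the last entry with that key (dynamic overriding static), emits the merged record and drops that key from both lists.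
import Mathlib
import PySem

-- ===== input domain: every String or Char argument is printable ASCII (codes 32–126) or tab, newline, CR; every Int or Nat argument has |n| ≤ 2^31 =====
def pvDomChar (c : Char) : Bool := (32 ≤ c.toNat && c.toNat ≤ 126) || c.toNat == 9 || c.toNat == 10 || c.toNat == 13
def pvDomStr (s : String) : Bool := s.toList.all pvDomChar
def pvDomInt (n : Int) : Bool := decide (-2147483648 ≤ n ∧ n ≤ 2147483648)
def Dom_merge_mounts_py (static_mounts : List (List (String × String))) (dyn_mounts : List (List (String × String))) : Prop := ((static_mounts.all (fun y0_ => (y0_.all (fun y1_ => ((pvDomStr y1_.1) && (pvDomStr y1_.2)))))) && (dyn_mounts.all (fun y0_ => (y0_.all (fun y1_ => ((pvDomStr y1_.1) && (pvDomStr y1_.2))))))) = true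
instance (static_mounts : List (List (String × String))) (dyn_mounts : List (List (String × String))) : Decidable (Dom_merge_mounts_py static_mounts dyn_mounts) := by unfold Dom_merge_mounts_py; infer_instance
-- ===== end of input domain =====

-- B drops A's two index dicts and library sort: it repeatedly selects the smallest remaining
-- mount_point and scans both (once-filtered) lists for its last static/dynamic entry — an
-- alternative selection-based algorithm of similar practical cost.

-- ===== PORT A =====
def merge_mounts_py (static_mounts : List (List (String × String))) (dyn_mounts : List (List (String × String))) : List (List (String × String)) :=
  let s_by_mp : PySem.Dict String (List (String × String)) :=
    static_mounts.foldl (fun d m =>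
      match (PySem.Dict.mk m).get? "mount_point" with
      | some mp => if mp = "" then d else d.insert mp m
      | none => d) PySem.Dict.empty
  let d_by_mp : PySem.Dict String (List (String × String)) :=
    dyn_mounts.foldl (fun d m =>
      match (PySem.Dict.mk m).get? "mount_point" with
      | some mp => if mp = "" then d else d.insert mp m
      | none => d) PySem.Dict.empty
  let all_mps : List String :=
    PySem.List.sorted (PySem.Set.union (PySem.Set.ofList (PySem.Dict.keys s_by_mp)) (PySem.Dict.keys d_by_mp)) (fun x => x) false
  all_mps.map (fun mp =>
    let s := s_by_mp.getD mp []
    let d := d_by_mp.getD mp []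
    (d.foldl (fun a kv => a.insert kv.1 kv.2)
      (s.foldl (fun a kv => a.insert kv.1 kv.2)
        ((PySem.Dict.empty).insert "mount_point" mp))).items)

-- ===== PORT B =====
-- `m.get("mount_point")` is truthy (non-empty string present)
def pvValid (m : List (String × String)) : Bool :=
  match (PySem.Dict.mk m).get? "mount_point" with
  | some mp => !(mp == "")
  | none => false

-- `m["mount_point"]`; exact on the filtered lists, where pvValid guarantees the key is present
def pvKey (m : List (String × String)) : String := (PySem.Dict.mk m).getD "mount_point" ""

-- termination of the selection loop: the minimum key is attained, so filtering it out shrinks the lists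
theorem pvFilterLt (stat dyn : List (List (String × String))) (mp : String)
    (h : mp ∈ (stat ++ dyn).map pvKey) :
    (stat.filter (fun m => !(pvKey m == mp))).length + (dyn.filter (fun m => !(pvKey m == mp))).length
      < stat.length + dyn.length := by
  rcases List.mem_map.mp h with ⟨m, hm, hk⟩
  rcases List.mem_append.mp hm with hs | hd
  · have h1 : (stat.filter (fun m => !(pvKey m == mp))).length < stat.length :=
      List.length_filter_lt_length_iff_exists.mpr ⟨m, hs, by simp [hk]⟩
    have h2 := List.length_filter_le (fun m => !(pvKey m == mp)) dyn
    omega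
  · have h1 : (dyn.filter (fun m => !(pvKey m == mp))).length < dyn.length :=
      List.length_filter_lt_length_iff_exists.mpr ⟨m, hd, by simp [hk]⟩
    have h2 := List.length_filter_le (fun m => !(pvKey m == mp)) stat
    omega

-- the `while stat or dyn` selection loop of B
def pvLoop (stat dyn : List (List (String × String))) : List (List (String × String)) :=
  match hmin : PySem.List.min? ((stat ++ dyn).map pvKey) (fun x => x) with
  | none => []
  | some mp =>
    let s := stat.foldl (fun s m => if pvKey m = mp then m else s) []
    let d := dyn.foldl (fun d m => if pvKey m = mp then m else d) []
    ((d.foldl (fun a kv => a.insert kv.1 kv.2)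
        (s.foldl (fun a kv => a.insert kv.1 kv.2)
          ((PySem.Dict.empty).insert "mount_point" mp))).items)
      :: pvLoop (stat.filter (fun m => !(pvKey m == mp))) (dyn.filter (fun m => !(pvKey m == mp)))
termination_by stat.length + dyn.length
decreasing_by
  have h := pvFilterLt stat dyn mp (PySem.List.min?_mem hmin)
  have e1 : (List.filter (fun (x : Subtype (Membership.mem stat)) => !pvKey ↑x == mp) stat.attach).length
      = (stat.filter (fun m => !(pvKey m == mp))).length := by
    rw [← List.countP_eq_length_filter, ← List.countP_eq_length_filter]
    exact List.countP_attach (l := stat) (p := fun m => !(pvKey m == mp))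
  have e2 : (List.filter (fun (x : Subtype (Membership.mem dyn)) => !pvKey ↑x == mp) dyn.attach).length
      = (dyn.filter (fun m => !(pvKey m == mp))).length := by
    rw [← List.countP_eq_length_filter, ← List.countP_eq_length_filter]
    exact List.countP_attach (l := dyn) (p := fun m => !(pvKey m == mp))
  simp only [List.length_unattach]
  omega

def merge_mounts_py_alt (static_mounts : List (List (String × String))) (dyn_mounts : List (List (String × String))) : List (List (String × String)) :=
  pvLoop (static_mounts.filter pvValid) (dyn_mounts.filter pvValid)

-- ===== PRECONDITION & SPEC =====
def Spec_merge_mounts_py (static_mounts : List (List (String × String))) (dyn_mounts : List (List (String × String))) (out : List (List (String × String))) : Prop := out = merge_mounts_py_alt static_mounts dyn_mounts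
instance (static_mounts : List (List (String × String))) (dyn_mounts : List (List (String × String))) (out : List (List (String × String))) : Decidable (Spec_merge_mounts_py static_mounts dyn_mounts out) := by unfold Spec_merge_mounts_py; infer_instance

-- ===== CLAIM (what is proved, stated in full; the proofs are below) =====
def Claim_equal_merge_mounts_py : Prop := ∀ (static_mounts : List (List (String × String))) (dyn_mounts : List (List (String × String))), Dom_merge_mounts_py static_mounts dyn_mounts → Spec_merge_mounts_py static_mounts dyn_mounts (merge_mounts_py static_mounts dyn_mounts)

-- ===== LEMMAS AND PROOFS =====

-- the last element of l whose key is k, as an option / with default []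
def pvLast? (l : List (List (String × String))) (k : String) : Option (List (String × String)) :=
  l.foldl (fun s m => if pvKey m = k then some m else s) none

def pvLastD (l : List (List (String × String))) (k : String) : List (String × String) :=
  l.foldl (fun s m => if pvKey m = k then m else s) []

-- the merged record {"mount_point": mp, **s, **d}
def pvBuild (mp : String) (s d : List (String × String)) : List (String × String) :=
  (d.foldl (fun a kv => a.insert kv.1 kv.2)
    (s.foldl (fun a kv => a.insert kv.1 kv.2)
      ((PySem.Dict.empty).insert "mount_point" mp))).items

def pvRes (stat dyn : List (List (String × String))) (mp : String) : List (String × String) :=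
  pvBuild mp (pvLastD stat mp) (pvLastD dyn mp)

def pvKeysSorted (stat dyn : List (List (String × String))) : List String :=
  PySem.List.sorted (PySem.Set.ofList ((stat ++ dyn).map pvKey)) (fun x => x) false

-- A's index-building loop, named
def pvIdx (ms : List (List (String × String))) (d : PySem.Dict String (List (String × String))) : PySem.Dict String (List (String × String)) :=
  ms.foldl (fun d m =>
    match (PySem.Dict.mk m).get? "mount_point" with
    | some mp => if mp = "" then d else d.insert mp m
    | none => d) d

theorem pvValid_key (m : List (String × String)) (h : pvValid m = true) :
    (PySem.Dict.mk m).get? "mount_point" = some (pvKey m) ∧ pvKey m ≠ "" := by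
  unfold pvValid at h
  unfold pvKey PySem.Dict.getD
  cases hg : (PySem.Dict.mk m).get? "mount_point" with
  | none => rw [hg] at h; simp at h
  | some mp => rw [hg] at h; simp at h ⊢; exact h

theorem pvLast?_or (l : List (List (String × String))) (k : String) (o : Option (List (String × String))) :
    l.foldl (fun s m => if pvKey m = k then some m else s) o = (pvLast? l k).or o := by
  induction l generalizing o with
  | nil => simp [pvLast?]
  | cons m l ih =>
    show l.foldl _ (if pvKey m = k then some m else o) = _
    rw [ih]
    have h2 : pvLast? (m :: l) k
        = (l.foldl (fun s m => if pvKey m = k then some m else s) (if pvKey m = k then some m else none)) := rfl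
    rw [h2, ih]
    cases hl : pvLast? l k with
    | some v => simp
    | none => split_ifs <;> simp

theorem pvLast?_cons (m : List (String × String)) (l : List (List (String × String))) (k : String) :
    pvLast? (m :: l) k = (pvLast? l k).or (if pvKey m = k then some m else none) := by
  have h : pvLast? (m :: l) k
      = l.foldl (fun s m => if pvKey m = k then some m else s) (if pvKey m = k then some m else none) := rfl
  rw [h, pvLast?_or]

theorem pvLastD_eq (l : List (List (String × String))) (k : String) :
    pvLastD l k = (pvLast? l k).getD [] := by
  unfold pvLastD pvLast?
  suffices h : ∀ (o : Option (List (String × String))) (a : List (String × String)), o.getD [] = a →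
      l.foldl (fun s m => if pvKey m = k then m else s) a
        = (l.foldl (fun s m => if pvKey m = k then some m else s) o).getD [] by
    exact h none [] rfl
  induction l with
  | nil => intro o a h; simpa using h.symm
  | cons m l ih =>
    intro o a h
    simp only [List.foldl_cons]
    split_ifs with hk
    · exact ih (some m) m rfl
    · exact ih o a h

theorem pvLast?_ne_none_iff (l : List (List (String × String))) (k : String) :
    pvLast? l k ≠ none ↔ k ∈ l.map pvKey := by
  induction l with
  | nil => simp [pvLast?]
  | cons m l ih =>
    rw [pvLast?_cons, List.map_cons, List.mem_cons]
    cases hl : pvLast? l k with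
    | some v =>
      have hk : k ∈ l.map pvKey := ih.mp (by rw [hl]; simp)
      simp [hk]
    | none =>
      have hnk : ¬ k ∈ l.map pvKey := fun h => (ih.mpr h) hl
      by_cases hk : pvKey m = k
      · simp [hk]
      · simp [hnk, hk, Ne.symm hk]

theorem pvIdx_get? (ms : List (List (String × String))) (d : PySem.Dict String (List (String × String))) (k : String) :
    (pvIdx ms d).get? k = (pvLast? (ms.filter pvValid) k).or (d.get? k) := by
  induction ms generalizing d with
  | nil => simp [pvIdx, pvLast?]
  | cons m ms ih =>
    simp only [pvIdx, List.foldl_cons] at ih ⊢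
    by_cases hv : pvValid m = true
    · obtain ⟨hg, hne⟩ := pvValid_key m hv
      have hstep : (match (PySem.Dict.mk m).get? "mount_point" with
          | some mp => if mp = "" then d else d.insert mp m
          | none => d) = d.insert (pvKey m) m := by
        rw [hg]; simp [hne]
      rw [hstep, List.filter_cons_of_pos hv, ih, pvLast?_cons, Option.or_assoc,
        PySem.Dict.get?_insert]
      congr 1
      by_cases hk : pvKey m = k
      · simp [hk]
      · simp [hk, Ne.symm hk]
    · have hstep : (match (PySem.Dict.mk m).get? "mount_point" with
          | some mp => if mp = "" then d else d.insert mp m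
          | none => d) = d := by
        unfold pvValid at hv
        cases hg : (PySem.Dict.mk m).get? "mount_point" with
        | none => simp
        | some mp => rw [hg] at hv; simp at hv; simp [hv]
      rw [hstep, List.filter_cons_of_neg (by simp [hv]), ih]

theorem pvLastD_filter (l : List (List (String × String))) (mp k : String) (h : k ≠ mp) :
    pvLastD (l.filter (fun m => !(pvKey m == mp))) k = pvLastD l k := by
  unfold pvLastD
  suffices hgen : ∀ (a : List (String × String)),
      (l.filter (fun m => !(pvKey m == mp))).foldl (fun s m => if pvKey m = k then m else s) a
        = l.foldl (fun s m => if pvKey m = k then m else s) a by exact hgen []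
  induction l with
  | nil => intro a; rfl
  | cons m l ih =>
    intro a
    by_cases hm : pvKey m = mp
    · rw [List.filter_cons_of_neg (by simp [hm]), List.foldl_cons, if_neg (by rw [hm]; exact fun hh => h hh.symm)]
      exact ih a
    · rw [List.filter_cons_of_pos (by simp [hm]), List.foldl_cons, List.foldl_cons]
      exact ih _

theorem pvKeysSorted_pairwise (stat dyn : List (List (String × String))) :
    (pvKeysSorted stat dyn).Pairwise (· < ·) :=
  PySem.List.sorted_ofList_pairwise_lt _

theorem mem_pvKeysSorted (stat dyn : List (List (String × String))) (x : String) :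
    x ∈ pvKeysSorted stat dyn ↔ x ∈ (stat ++ dyn).map pvKey := by
  unfold pvKeysSorted
  rw [PySem.List.mem_sorted, PySem.Set.mem_ofList]

-- B's loop produces exactly the sorted-key map of pvRes
theorem pvLoop_eq (stat0 dyn0 : List (List (String × String))) :
    pvLoop stat0 dyn0 = (pvKeysSorted stat0 dyn0).map (pvRes stat0 dyn0) := by
  generalize hn : stat0.length + dyn0.length = n
  induction n using Nat.strong_induction_on generalizing stat0 dyn0 with
  | _ n ih =>
  rw [pvLoop.eq_def]
  split
  next hmin =>
    have hnil : (stat0 ++ dyn0).map pvKey = [] := (PySem.List.min?_eq_none_iff _ _).mp hmin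
    have : pvKeysSorted stat0 dyn0 = [] := by
      unfold pvKeysSorted
      rw [hnil]
      rfl
    rw [this]; rfl
  next mp hmin =>
    have ihf : ∀ (s' d' : List (List (String × String))),
        s' = stat0.filter (fun m => !(pvKey m == mp)) → d' = dyn0.filter (fun m => !(pvKey m == mp)) →
        pvLoop s' d' = (pvKeysSorted s' d').map (pvRes s' d') := by
      intro s' d' hs hd
      refine ih (s'.length + d'.length) ?_ s' d' rfl
      rw [← hn, hs, hd]
      exact pvFilterLt stat0 dyn0 mp (PySem.List.min?_mem hmin)
    have ihf' := ihf _ _ rfl rfl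
    set statf := stat0.filter (fun m => !(pvKey m == mp)) with hs'
    set dynf := dyn0.filter (fun m => !(pvKey m == mp)) with hd'
    -- K = mp :: t
    set K := pvKeysSorted stat0 dyn0 with hK
    have hKpw : K.Pairwise (· < ·) := pvKeysSorted_pairwise stat0 dyn0
    have hmpK : mp ∈ K := (mem_pvKeysSorted stat0 dyn0 mp).mpr (PySem.List.min?_mem hmin)
    have hmin' : ∀ y ∈ K, mp ≤ y := fun y hy =>
      PySem.List.min?_isMin hmin y ((mem_pvKeysSorted stat0 dyn0 y).mp hy)
    obtain ⟨k0, t, hKt⟩ : ∃ k0 t, K = k0 :: t := by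
      cases hc : K with
      | nil => rw [hc] at hmpK; simp at hmpK
      | cons a b => exact ⟨a, b, rfl⟩
    have hk0lt : ∀ y ∈ t, k0 < y := (List.pairwise_cons.mp (hKt ▸ hKpw)).1
    have hk0 : k0 = mp := by
      have h1 : mp ≤ k0 := hmin' k0 (hKt ▸ List.mem_cons_self)
      rcases (List.mem_cons.mp (hKt ▸ hmpK)) with h | h
      · exact h.symm
      · exact absurd (hk0lt mp h) (not_lt.mpr h1)
    have hmpnott : mp ∉ t := fun h => lt_irrefl mp (hk0 ▸ hk0lt mp h)
    -- the tail is the sorted keys of the filtered lists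
    have htpw : t.Pairwise (· < ·) := (List.pairwise_cons.mp (hKt ▸ hKpw)).2
    have htail : pvKeysSorted statf dynf = t := by
      apply PySem.List.sorted_eq_of_perm_of_pairwise_lt
      · apply (List.perm_ext_iff_of_nodup (htpw.imp ne_of_lt) (PySem.Set.nodup_ofList _)).mpr
        intro x
        rw [PySem.Set.mem_ofList]
        constructor
        · intro hx
          have hxK : x ∈ K := hKt ▸ List.mem_cons_of_mem _ hx
          have hxmp : x ≠ mp := fun h => hmpnott (h ▸ hx)
          have := (mem_pvKeysSorted stat0 dyn0 x).mp hxK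
          rcases List.mem_map.mp this with ⟨m, hm, hmk⟩
          apply List.mem_map.mpr
          refine ⟨m, ?_, hmk⟩
          rcases List.mem_append.mp hm with h | h
          · exact List.mem_append.mpr (Or.inl (List.mem_filter.mpr ⟨h, by simp [hmk, hxmp]⟩))
          · exact List.mem_append.mpr (Or.inr (List.mem_filter.mpr ⟨h, by simp [hmk, hxmp]⟩))
        · intro hx
          rcases List.mem_map.mp hx with ⟨m, hm, hmk⟩
          have hmmem : m ∈ stat0 ++ dyn0 := by
            rcases List.mem_append.mp hm with h | h
            · exact List.mem_append.mpr (Or.inl (List.mem_filter.mp h).1)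
            · exact List.mem_append.mpr (Or.inr (List.mem_filter.mp h).1)
          have hxmp : x ≠ mp := by
            rcases List.mem_append.mp hm with h | h <;>
            · have := (List.mem_filter.mp h).2
              simp at this
              rw [← hmk]; exact this
          have hxK : x ∈ K := (mem_pvKeysSorted stat0 dyn0 x).mpr (List.mem_map.mpr ⟨m, hmmem, hmk⟩)
          rcases List.mem_cons.mp (hKt ▸ hxK) with h | h
          · exact absurd (hk0 ▸ h) hxmp
          · exact h
      · exact htpw
    -- head record is pvRes stat0 dyn0 mp, tail records agree via filtering
    rw [ihf', htail, hKt, List.map_cons, hk0]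
    refine congrArg₂ List.cons rfl (List.map_congr_left fun x hx => ?_)
    have hxmp : x ≠ mp := fun h => hmpnott (h ▸ hx)
    unfold pvRes
    rw [hs', hd', pvLastD_filter stat0 mp x hxmp, pvLastD_filter dyn0 mp x hxmp]

-- A produces the same sorted-key map of pvRes
theorem merge_mounts_py_eq (sm dm : List (List (String × String))) :
    merge_mounts_py sm dm
      = (pvKeysSorted (sm.filter pvValid) (dm.filter pvValid)).map
          (pvRes (sm.filter pvValid) (dm.filter pvValid)) := by
  unfold merge_mounts_py
  set stat := sm.filter pvValid with hstat
  set dyn := dm.filter pvValid with hdyn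
  show (PySem.List.sorted (PySem.Set.union (PySem.Set.ofList (PySem.Dict.keys (pvIdx sm PySem.Dict.empty))) (PySem.Dict.keys (pvIdx dm PySem.Dict.empty))) (fun x => x) false).map
      (fun mp => (((pvIdx dm PySem.Dict.empty).getD mp []).foldl (fun a kv => a.insert kv.1 kv.2)
        (((pvIdx sm PySem.Dict.empty).getD mp []).foldl (fun a kv => a.insert kv.1 kv.2)
          ((PySem.Dict.empty).insert "mount_point" mp))).items)
    = (pvKeysSorted stat dyn).map (pvRes stat dyn)
  have hget : ∀ (ms : List (List (String × String))) k,
      (pvIdx ms PySem.Dict.empty).get? k = pvLast? (ms.filter pvValid) k := by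
    intro ms k
    rw [pvIdx_get?, PySem.Dict.get?_empty, Option.or_none]
  have hkeys : ∀ (ms : List (List (String × String))) k,
      k ∈ PySem.Dict.keys (pvIdx ms PySem.Dict.empty) ↔ k ∈ (ms.filter pvValid).map pvKey := by
    intro ms k
    rw [← pvLast?_ne_none_iff, ← hget]
    simp [Ne, PySem.Dict.get?_eq_none_iff_not_mem_keys]
  have hsorted : PySem.List.sorted (PySem.Set.union (PySem.Set.ofList (PySem.Dict.keys (pvIdx sm PySem.Dict.empty))) (PySem.Dict.keys (pvIdx dm PySem.Dict.empty))) (fun x => x) false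
      = pvKeysSorted stat dyn := by
    unfold pvKeysSorted
    apply PySem.List.sorted_eq_sorted_of_perm _ _ _ (fun a b h => h)
    apply (List.perm_ext_iff_of_nodup
      (PySem.Set.nodup_union _ _ (PySem.Set.nodup_ofList _))
      (PySem.Set.nodup_ofList _)).mpr
    intro x
    rw [PySem.Set.mem_union, PySem.Set.mem_ofList, PySem.Set.mem_ofList, hkeys, hkeys,
      List.map_append, List.mem_append]
  rw [hsorted]
  apply List.map_congr_left
  intro mp _
  unfold pvRes pvBuild
  rw [PySem.Dict.getD_eq_get?_getD, PySem.Dict.getD_eq_get?_getD, hget, hget,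
    ← pvLastD_eq, ← pvLastD_eq]

-- ===== VERDICT (by name: the statement is the Claim_ definition above) =====
theorem merge_mounts_py_spec : Claim_equal_merge_mounts_py := by
  intro sm dm _
  unfold Spec_merge_mounts_py merge_mounts_py_alt
  rw [merge_mounts_py_eq, pvLoop_eq]
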